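-- pv_equiv track=rewrite | github.com/MrLotU/AdventOfCode2020 | solutions/five.py | split_calc
-- ===== SOURCE A (Python) =====
-- def split_calc(letters, r):
--     if len(r) == 1:
--         return r[0]
--     l = letters[0]
--     split_idx = int(len(r) / 2)
--     if l in ['F', 'L']:
--         return split_calc(letters[1:], r=r[:split_idx])
--     elif l in ['B', 'R']:
--         return split_calc(letters[1:], r=r[split_idx:])
-- ===== SOURCE B (Python) =====
-- def split_calc(letters, r):
--     lo, hi = 0, len(r)
--     i = 0
--     while hi - lo > 1:
--         mid = lo + (hi - lo) // 2
--         if letters[i] in 'FL':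
--             hi = mid
--         else:
--             lo = mid
--         i += 1
--     return r[lo]
-- ===== Notes on version B (the rewrite author's own statement) =====
-- stated objective: alternative
-- what changed: Replaced the recursion that materialises a half-copy of the list at every level (letters[1:], r[:mid]/r[mid:]) by a single iterative loop that only narrows an index window [lo,hi) over the untouched list and returns r[lo] (asymptotically lighter, but a timing run's large inputs fall outside A's domain, so no speed is claimed).
-- outside the precondition, e.g. on split_calc('ab', [0, 1]): A returns None, B returns 1; on split_calc('FX', [3, 4, 5, 6]): A returns None, B returns 4
import Mathlib
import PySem

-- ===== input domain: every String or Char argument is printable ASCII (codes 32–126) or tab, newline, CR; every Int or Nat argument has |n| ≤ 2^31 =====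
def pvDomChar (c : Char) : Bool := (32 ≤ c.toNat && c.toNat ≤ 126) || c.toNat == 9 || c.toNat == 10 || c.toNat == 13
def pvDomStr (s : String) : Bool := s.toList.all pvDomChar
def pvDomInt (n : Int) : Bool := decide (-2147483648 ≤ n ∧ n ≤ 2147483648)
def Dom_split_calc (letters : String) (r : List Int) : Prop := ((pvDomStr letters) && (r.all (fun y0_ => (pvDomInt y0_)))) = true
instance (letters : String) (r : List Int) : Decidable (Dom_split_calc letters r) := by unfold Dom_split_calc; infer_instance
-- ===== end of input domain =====

-- B replaces A's slice-copying recursion by an iterative index window (lo,hi) over r: no list copies.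


-- ===== PORT A =====
-- Literal port of A's recursion over letters (letters[1:] is the structural tail; the 'len(r) == 1'
-- test is written once per constructor so each equation is a plain term).  Where the Python raises
-- (letters exhausted while len(r) ≠ 1: letters[0] → IndexError) or returns None (first letter not
-- in FBLR), the port returns the junk value 0; Pre_ excludes those inputs.  split_idx =
-- int(len(r)/2) is ported as Nat division by 2 (exact: Python float division is exact below 2^52).
def splitCalcA : List Char → List Int → Int
  | [], r =>
    if r.length = 1 then (PySem.List.pyGet? r 0).getD 0       -- return r[0]
    else 0                                                    -- letters[0] → IndexError
  | l :: rest, r =>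
    if r.length = 1 then (PySem.List.pyGet? r 0).getD 0       -- return r[0]
    else
      if l = 'F' ∨ l = 'L' then
        splitCalcA rest (PySem.List.slice r none (some ((r.length / 2 : Nat) : Int)))   -- r[:split_idx]
      else if l = 'B' ∨ l = 'R' then
        splitCalcA rest (PySem.List.slice r (some ((r.length / 2 : Nat) : Int)) none)   -- r[split_idx:]
      else 0                                                  -- Python returns None here

def split_calc (letters : String) (r : List Int) : Int := splitCalcA letters.toList r

-- ===== PORT B =====
-- Port of Source B's while loop: state (lo, hi, i); mid is inlined; letters[i] out of range would be an
-- IndexError in Python (junk ' ' here, excluded by Pre_).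
def splitCalcB (letters : List Char) (r : List Int) (lo hi i : Nat) : Int :=
  if 1 < hi - lo then
    if ((PySem.List.pyGet? letters (i : Int)).getD ' ') = 'F' ∨
       ((PySem.List.pyGet? letters (i : Int)).getD ' ') = 'L' then
      splitCalcB letters r lo (lo + (hi - lo) / 2) (i + 1)
    else
      splitCalcB letters r (lo + (hi - lo) / 2) hi (i + 1)
  else (PySem.List.pyGet? r (lo : Int)).getD 0                -- return r[lo]
  termination_by hi - lo
  decreasing_by all_goals omega

def split_calc_alt (letters : String) (r : List Int) : Int :=
  splitCalcB letters.toList r 0 r.length 0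

-- ===== PRECONDITION & SPEC =====
-- Length of the leading run of F/B/L/R letters (a plain measure of the input, used only by Pre_).
def pvLeadValid : List Char → Nat
  | [] => 0
  | c :: cs => if c = 'F' ∨ c = 'B' ∨ c = 'L' ∨ c = 'R' then pvLeadValid cs + 1 else 0

-- The letters read as a binary numeral, first letter least significant: B/R = 1, anything else = 0.
def pvBits : List Char → Nat
  | [] => 0
  | c :: cs => (if c = 'B' ∨ c = 'R' then 1 else 0) + 2 * pvBits cs

-- Pre_ is exactly the inputs on which the Python A returns an int: r is non-empty and successive
-- halving of |r| (lower half for F/L, upper half for B/R) reaches a single cell within the leading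
-- run of F/B/L/R letters — in closed form, ⌊(|r| + bits)/2^j⌋ = 1 where bits reads the first j
-- letters as a binary numeral (B/R = 1).  Outside Pre_, A raises IndexError or returns None.
def Pre_split_calc (letters : String) (r : List Int) : Prop :=
  r ≠ [] ∧ ∃ j ∈ List.range (pvLeadValid letters.toList + 1),
    (r.length + pvBits (letters.toList.take j)) / 2 ^ j = 1
instance (letters : String) (r : List Int) : Decidable (Pre_split_calc letters r) := by
  unfold Pre_split_calc; infer_instance

def pvWitness_split_calc : String × List Int := ("FB", [10, 20, 30, 40])

def Spec_split_calc (letters : String) (r : List Int) (out : Int) : Prop := out = split_calc_alt letters r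
instance (letters : String) (r : List Int) (out : Int) : Decidable (Spec_split_calc letters r out) := by
  unfold Spec_split_calc; infer_instance

-- ===== CLAIM (what is proved, stated in full; the proofs are below) =====
def Claim_equal_split_calc : Prop := ∀ (letters : String) (r : List Int), Dom_split_calc letters r → Pre_split_calc letters r → Spec_split_calc letters r (split_calc letters r)

-- ===== LEMMAS AND PROOFS =====

-- Proof-side termination predicate: halving n along the letters reaches exactly 1.
def pvTermB : List Char → Nat → Bool
  | [], n => n == 1
  | c :: rest, n =>
    if n = 1 then true
    else if c = 'F' ∨ c = 'L' then pvTermB rest (n / 2)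
    else if c = 'B' ∨ c = 'R' then pvTermB rest (n - n / 2)
    else false

-- The closed-form Pre_ condition implies the termination predicate.
theorem pv_pre_term (ls : List Char) : ∀ (n j : Nat), j ≤ pvLeadValid ls →
    (n + pvBits (ls.take j)) / 2 ^ j = 1 → pvTermB ls n = true := by
  induction ls with
  | nil =>
    intro n j hj hdiv
    simp only [pvLeadValid, Nat.le_zero] at hj
    subst hj
    simp only [List.take_nil, pvBits, Nat.add_zero, pow_zero, Nat.div_one] at hdiv
    simp [pvTermB, hdiv]
  | cons c rest ih =>
    intro n j hj hdiv
    match j with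
    | 0 =>
      simp only [List.take_zero, pvBits, Nat.add_zero, pow_zero, Nat.div_one] at hdiv
      subst hdiv
      simp [pvTermB]
    | k + 1 =>
      have hcval : c = 'F' ∨ c = 'B' ∨ c = 'L' ∨ c = 'R' := by
        by_contra hc
        simp only [pvLeadValid, if_neg hc, Nat.le_zero] at hj
        omega
      have hk : k ≤ pvLeadValid rest := by
        simp only [pvLeadValid, if_pos hcval] at hj
        omega
      rw [List.take_succ_cons] at hdiv
      simp only [pvBits] at hdiv
      set s : Nat := if c = 'B' ∨ c = 'R' then 1 else 0 with hs
      set B : Nat := pvBits (rest.take k) with hB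
      have hsplit : (n + (s + 2 * B)) / 2 ^ (k + 1) = ((n + s) / 2 + B) / 2 ^ k := by
        have hnum : (n + (s + 2 * B)) / 2 = (n + s) / 2 + B := by omega
        have hpow : (2 : Nat) ^ (k + 1) = 2 * 2 ^ k := by ring
        rw [hpow, ← Nat.div_div_eq_div_mul, hnum]
      rw [hsplit] at hdiv
      by_cases hn : n = 1
      · simp [pvTermB, hn]
      · rw [pvTermB, if_neg hn]
        by_cases hFL : c = 'F' ∨ c = 'L'
        · rw [if_pos hFL]
          refine ih (n / 2) k hk ?_
          have hs0 : s = 0 := by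
            rw [hs, if_neg]
            rintro (hb | hb) <;> rcases hFL with hf | hf <;> subst hb <;> simp_all
          rw [hs0, Nat.add_zero] at hdiv
          exact hdiv
        · have hBR : c = 'B' ∨ c = 'R' := by tauto
          rw [if_neg hFL, if_pos hBR]
          refine ih (n - n / 2) k hk ?_
          have hs1 : s = 1 := by rw [hs, if_pos hBR]
          rw [hs1] at hdiv
          have harg : (n + 1) / 2 = n - n / 2 := by omega
          rw [harg] at hdiv
          exact hdiv

-- B's return r[lo] equals A's return seg[0] on the one-cell window seg = r[lo:hi], hi - lo = 1.
theorem pv_cell (r : List Int) (lo hi : Nat) (hone : hi - lo = 1) :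
    (PySem.List.pyGet? r (lo : Int)).getD 0
      = (PySem.List.pyGet? ((r.drop lo).take (hi - lo)) 0).getD 0 := by
  have h1 : (PySem.List.pyGet? r (lo : Int)) = r[lo]? := by
    simp [PySem.List.pyGet?_natCast]
  have h2 : (PySem.List.pyGet? ((r.drop lo).take (hi - lo)) 0)
      = ((r.drop lo).take (hi - lo))[0]? := by
    have := PySem.List.pyGet?_natCast ((r.drop lo).take (hi - lo)) 0
    simpa using this
  rw [h1, h2, List.getElem?_take, if_pos (by omega), List.getElem?_drop]
  norm_num

-- Main invariant: the window [lo, hi) of B corresponds to the slice A recurses on.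
theorem pv_inv (ls : List Char) : ∀ (letters : List Char) (r : List Int) (lo hi i : Nat),
    letters.drop i = ls →
    pvTermB ls (hi - lo) = true →
    lo < hi → hi ≤ r.length →
    splitCalcB letters r lo hi i = splitCalcA ls ((r.drop lo).take (hi - lo)) := by
  induction ls with
  | nil =>
    intro letters r lo hi i _ hterm hlt hle
    have hone : hi - lo = 1 := by simpa [pvTermB] using hterm
    have hlen : ((r.drop lo).take (hi - lo)).length = 1 := by
      simp only [List.length_take, List.length_drop]; omega
    rw [splitCalcB, if_neg (by omega), splitCalcA, if_pos hlen]
    exact pv_cell r lo hi hone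
  | cons c rest ih =>
    intro letters r lo hi i hdrop hterm hlt hle
    by_cases hone : hi - lo = 1
    · -- window already a single cell: A returns immediately too, letters unread
      have hlen : ((r.drop lo).take (hi - lo)).length = 1 := by
        simp only [List.length_take, List.length_drop]; omega
      rw [splitCalcB, if_neg (by omega), splitCalcA, if_pos hlen]
      exact pv_cell r lo hi hone
    · have h2lt : 1 < hi - lo := by omega
      have hget : (PySem.List.pyGet? letters (i : Int)).getD ' ' = c := by
        have h0 : letters[i]? = some c := by
          have : (letters.drop i)[0]? = some c := by rw [hdrop]; rfl
          simpa using this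
        simp [PySem.List.pyGet?_natCast, h0]
      have hdrop' : letters.drop (i + 1) = rest := by
        have h1 : letters.drop (i + 1) = (letters.drop i).drop 1 := by
          rw [List.drop_drop]
        rw [h1, hdrop]; rfl
      have hseglen : ((r.drop lo).take (hi - lo)).length = hi - lo := by
        simp only [List.length_take, List.length_drop]; omega
      have hnot1 : ¬ ((r.drop lo).take (hi - lo)).length = 1 := by omega
      rw [pvTermB, if_neg hone] at hterm
      rw [splitCalcB, if_pos h2lt, splitCalcA, if_neg hnot1]
      by_cases hFL : c = 'F' ∨ c = 'L'
      · rw [if_pos hFL] at hterm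
        rw [if_pos (hget ▸ hFL : _), if_pos hFL]
        rw [ih letters r lo (lo + (hi - lo) / 2) (i + 1) hdrop'
          (by rw [(by omega : lo + (hi - lo) / 2 - lo = (hi - lo) / 2)]; exact hterm)
          (by omega) (by omega)]
        congr 1
        rw [hseglen, PySem.List.slice_to_natCast, List.take_take]
        congr 1
        omega
      · by_cases hBR : c = 'B' ∨ c = 'R'
        · rw [if_neg hFL, if_pos hBR] at hterm
          rw [if_neg (hget ▸ hFL : _), if_neg hFL, if_pos hBR]
          rw [ih letters r (lo + (hi - lo) / 2) hi (i + 1) hdrop'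
            (by rw [(by omega : hi - (lo + (hi - lo) / 2) = (hi - lo) - (hi - lo) / 2)]; exact hterm)
            (by omega) hle]
          congr 1
          rw [hseglen, PySem.List.slice_from_natCast, List.drop_take, List.drop_drop]
          congr 1
          omega
        · rw [if_neg hFL, if_neg hBR] at hterm
          exact absurd hterm (by simp)

-- ===== VERDICT (by name: the statement is the Claim_ definition above) =====
theorem split_calc_spec : Claim_equal_split_calc := by
  intro letters r _ hpre
  obtain ⟨hne, j, hj, hdiv⟩ := hpre
  unfold Spec_split_calc split_calc split_calc_alt
  have hlen : 0 < r.length := List.length_pos_iff.mpr hne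
  have hterm : pvTermB letters.toList r.length = true :=
    pv_pre_term letters.toList r.length j (by simpa using Nat.lt_succ_iff.mp (List.mem_range.mp hj)) hdiv
  have h := pv_inv letters.toList letters.toList r 0 r.length 0 (by simp)
    (by simpa using hterm) hlen (le_refl _)
  rw [h]
  simp
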